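-- pv_equiv track=rewrite | github.com/fmkid/SortingAlgs | sortalg.py | sortminmax2
-- ===== SOURCE A (Python) =====
-- def sortminmax2(lista):
--     minimos = []
--     maximos = []
--     pasos = 0
--
--     while len(lista) > 1:
--         pos_fin = len(lista) - 1
--         if lista[0] > lista [pos_fin]:
--             pos_min = pos_fin
--             pos_max = 0
--         else:
--             pos_min = 0
--             pos_max = pos_fin
--         mayor = lista[pos_max]
--         menor = lista[pos_min]
--         for i in range(1, pos_fin):
--             if lista[i] > mayor:
--                 mayor = lista[i]
--                 pos_max = i
--             elif lista[i] < menor: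
--                 menor = lista[i]
--                 pos_min = i
--             pasos += 1
--         if mayor != menor:
--             minimos.append(menor)
--             maximos.insert(0,mayor)
--             if pos_max > pos_min:
--                 del lista[pos_max]
--                 del lista[pos_min]
--             else:
--                 del lista[pos_min]
--                 del lista[pos_max]
--             pasos += 1
--         else:
--             break
--     return pasos
-- ===== SOURCE B (Python) =====
-- def sortminmax2(lista):
--     s = sorted(lista)
--     pasos = 0
--     while len(s) > 1:
--         if s[0] == s[-1]:
--             pasos += len(s) - 2
--             break
--         pasos += len(s) - 1
--         s = s[1:-1]
--     return pasos
-- ===== Notes on version B (the rewrite author's own statement) =====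
-- stated objective: faster
-- what changed: A repeatedly scans the whole list for the current min and max and deletes them in place; B sorts a copy once and then peels the two ends of the sorted list, adding len-1 steps per round (len-2 on the all-equal break), so the per-round Python-level scan disappears.
import Mathlib
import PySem

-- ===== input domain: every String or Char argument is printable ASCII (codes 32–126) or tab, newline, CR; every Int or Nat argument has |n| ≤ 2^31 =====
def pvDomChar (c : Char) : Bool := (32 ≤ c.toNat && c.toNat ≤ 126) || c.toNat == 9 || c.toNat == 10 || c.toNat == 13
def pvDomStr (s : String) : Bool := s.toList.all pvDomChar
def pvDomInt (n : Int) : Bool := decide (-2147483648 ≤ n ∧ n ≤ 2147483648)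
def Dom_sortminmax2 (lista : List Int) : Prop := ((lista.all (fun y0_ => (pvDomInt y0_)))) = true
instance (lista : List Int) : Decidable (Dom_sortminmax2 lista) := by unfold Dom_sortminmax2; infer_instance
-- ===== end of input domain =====

-- B replaces A's repeated O(n) min/max scan-and-delete by one sort followed by peeling both ends;
-- A mutates its argument (del lista[...]) while B does not — the equivalence proved is about the return value.

-- ===== PORT A =====
-- the body of A's inner 'for i in range(1, pos_fin)' loop; state = (mayor, pos_max, menor, pos_min, pasos)
def aStep (lista : List Int) (st : Int × Int × Int × Int × Int) (i : Int) : Int × Int × Int × Int × Int :=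
  let li := PySem.List.pyGetD lista i 0
  if li > st.1 then (li, i, st.2.2.1, st.2.2.2.1, st.2.2.2.2 + 1)
  else if li < st.2.2.1 then (st.1, st.2.1, li, i, st.2.2.2.2 + 1)
  else (st.1, st.2.1, st.2.2.1, st.2.2.2.1, st.2.2.2.2 + 1)

-- A's while loop, with fuel (each pass deletes two elements, so lista.length + 1 suffices).
-- minimos/maximos are dead locals for the returned value and are omitted.
-- 'del lista[pos]' is List.eraseIdx pos.toNat — exact here, since the deleted positions are indices in [0, len).
def sortminmax2Go : Nat → List Int → Int → Int
  | 0, _, pasos => pasos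
  | fuel + 1, lista, pasos =>
    if 1 < lista.length then
      let posFin : Int := (lista.length : Int) - 1
      let pos0 : Int × Int :=
        if PySem.List.pyGetD lista 0 0 > PySem.List.pyGetD lista posFin 0
        then (posFin, 0) else (0, posFin)  -- (pos_min, pos_max)
      let st := (PySem.List.pyRange 1 posFin 1).foldl (aStep lista)
        (PySem.List.pyGetD lista pos0.2 0, pos0.2, PySem.List.pyGetD lista pos0.1 0, pos0.1, pasos)
      if st.1 ≠ st.2.2.1 then
        let lista' := if st.2.1 > st.2.2.2.1
          then (lista.eraseIdx st.2.1.toNat).eraseIdx st.2.2.2.1.toNat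
          else (lista.eraseIdx st.2.2.2.1.toNat).eraseIdx st.2.1.toNat
        sortminmax2Go fuel lista' (st.2.2.2.2 + 1)
      else st.2.2.2.2
    else pasos

def sortminmax2 (lista : List Int) : Int := sortminmax2Go (lista.length + 1) lista 0

-- ===== PORT B =====
-- B's while loop on the sorted copy s, with fuel (each pass drops two elements)
def altGo : Nat → List Int → Int → Int
  | 0, _, pasos => pasos
  | fuel + 1, s, pasos =>
    if 1 < s.length then
      if PySem.List.pyGetD s 0 0 = PySem.List.pyGetD s (-1) 0 then
        pasos + (s.length : Int) - 2
      else
        altGo fuel (PySem.List.slice s (some 1) (some (-1))) (pasos + (s.length : Int) - 1)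
    else pasos

def sortminmax2_alt (lista : List Int) : Int :=
  altGo (lista.length + 1) (PySem.List.sorted lista (fun x => x) false) 0

-- ===== PRECONDITION & SPEC =====
def Spec_sortminmax2 (lista : List Int) (out : Int) : Prop := out = sortminmax2_alt lista
instance (lista : List Int) (out : Int) : Decidable (Spec_sortminmax2 lista out) := by unfold Spec_sortminmax2; infer_instance

-- ===== CLAIM (what is proved, stated in full; the proofs are below) =====
def Claim_equal_sortminmax2 : Prop := ∀ (lista : List Int), Dom_sortminmax2 lista → Spec_sortminmax2 lista (sortminmax2 lista)

-- ===== LEMMAS AND PROOFS =====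

-- s[1:-1] is the interior of the list
lemma slice_one_neg_one (xs : List Int) :
    PySem.List.slice xs (some 1) (some (-1)) = xs.tail.dropLast := by
  cases xs with
  | nil => rfl
  | cons a t =>
    simp [PySem.List.slice, PySem.List.clampIdx, List.dropLast_eq_take]
    split <;> omega

-- invariant of A's inner scan after processing indices 1..m (plus the initial pair {0, n-1})
def Good (l : List Int) (p0 : Int) (m : Nat) (st : Int × Int × Int × Int × Int) : Prop :=
  ∃ pM pm : Nat,
    st = (l.getD pM 0, (pM : Int), l.getD pm 0, (pm : Int), p0 + (m : Int)) ∧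
    pM < l.length ∧ pm < l.length ∧ l.getD pm 0 ≤ l.getD pM 0 ∧
    ∀ j : Nat, j < l.length → (j = 0 ∨ j = l.length - 1 ∨ (1 ≤ j ∧ j ≤ m)) →
      l.getD j 0 ≤ l.getD pM 0 ∧ l.getD pm 0 ≤ l.getD j 0

lemma good_init (l : List Int) (p : Int) (h2 : 2 ≤ l.length) :
    Good l p 0
      (let posFin : Int := (l.length : Int) - 1
       let pos0 : Int × Int :=
         if PySem.List.pyGetD l 0 0 > PySem.List.pyGetD l posFin 0
         then (posFin, 0) else (0, posFin)
       (PySem.List.pyGetD l pos0.2 0, pos0.2, PySem.List.pyGetD l pos0.1 0, pos0.1, p)) := by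
  have hc : ((l.length : Int) - 1) = ((l.length - 1 : Nat) : Int) := by omega
  simp only [hc, PySem.List.pyGetD_natCast, PySem.List.pyGetD_zero]
  by_cases h : l.getD 0 0 > l.getD (l.length - 1) 0
  · rw [if_pos h]
    refine ⟨0, l.length - 1, by simp [PySem.List.pyGetD_zero, List.getD], by omega, by omega, h.le, ?_⟩
    intro j hj hcase
    rcases hcase with h0 | h1 | h2
    · subst h0; exact ⟨le_refl _, h.le⟩
    · subst h1; exact ⟨h.le, le_refl _⟩
    · omega
  · rw [if_neg h]
    push_neg at h
    refine ⟨l.length - 1, 0, by simp [PySem.List.pyGetD_zero, List.getD], by omega, by omega, h, ?_⟩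
    intro j hj hcase
    rcases hcase with h0 | h1 | h2
    · subst h0; exact ⟨h, le_refl _⟩
    · subst h1; exact ⟨le_refl _, h⟩
    · omega

lemma good_step (l : List Int) (p : Int) (m : Nat) (st : Int × Int × Int × Int × Int)
    (hg : Good l p m st) (hm : m + 1 ≤ l.length - 2) :
    Good l p (m + 1) (aStep l st ((m : Int) + 1)) := by
  obtain ⟨pM, pm, hst, hpM, hpm, hle, hb⟩ := hg
  have hc : ((m : Int) + 1) = ((m + 1 : Nat) : Int) := by omega
  have hm1 : m + 1 < l.length := by omega
  subst hst
  unfold aStep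
  simp only [hc, PySem.List.pyGetD_natCast]
  by_cases h1 : l.getD (m + 1) 0 > l.getD pM 0
  · rw [if_pos h1]
    refine ⟨m + 1, pm, by push_cast; ring_nf, hm1, hpm, le_trans hle h1.le, ?_⟩
    intro j hj hcase
    rcases hcase with h0 | hfin | hmid
    · exact ⟨le_trans (hb j hj (Or.inl h0)).1 h1.le, (hb j hj (Or.inl h0)).2⟩
    · exact ⟨le_trans (hb j hj (Or.inr (Or.inl hfin))).1 h1.le, (hb j hj (Or.inr (Or.inl hfin))).2⟩
    · by_cases hj1 : j = m + 1
      · subst hj1; exact ⟨le_refl _, le_trans hle h1.le⟩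
      · have := hb j hj (Or.inr (Or.inr (by omega)))
        exact ⟨le_trans this.1 h1.le, this.2⟩
  · rw [if_neg h1]
    push_neg at h1
    by_cases h2 : l.getD (m + 1) 0 < l.getD pm 0
    · rw [if_pos h2]
      refine ⟨pM, m + 1, by push_cast; ring_nf, hpM, hm1, le_trans h2.le hle, ?_⟩
      intro j hj hcase
      rcases hcase with h0 | hfin | hmid
      · exact ⟨(hb j hj (Or.inl h0)).1, le_trans h2.le (hb j hj (Or.inl h0)).2⟩
      · exact ⟨(hb j hj (Or.inr (Or.inl hfin))).1, le_trans h2.le (hb j hj (Or.inr (Or.inl hfin))).2⟩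
      · by_cases hj1 : j = m + 1
        · subst hj1; exact ⟨h1, le_refl _⟩
        · have := hb j hj (Or.inr (Or.inr (by omega)))
          exact ⟨this.1, le_trans h2.le this.2⟩
    · rw [if_neg h2]
      push_neg at h2
      refine ⟨pM, pm, by push_cast; ring_nf, hpM, hpm, hle, ?_⟩
      intro j hj hcase
      rcases hcase with h0 | hfin | hmid
      · exact hb j hj (Or.inl h0)
      · exact hb j hj (Or.inr (Or.inl hfin))
      · by_cases hj1 : j = m + 1
        · subst hj1; exact ⟨h1, h2⟩
        · exact hb j hj (Or.inr (Or.inr (by omega)))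

lemma good_fold (l : List Int) (p : Int) (h2 : 2 ≤ l.length) (st0 : Int × Int × Int × Int × Int)
    (h0 : Good l p 0 st0) :
    Good l p (l.length - 2) ((PySem.List.pyRange 1 ((l.length : Int) - 1) 1).foldl (aStep l) st0) := by
  have main : ∀ k : Nat, 1 ≤ k → k ≤ l.length - 1 →
      Good l p (k - 1) ((PySem.List.pyRange 1 (k : Int) 1).foldl (aStep l) st0) := by
    intro k
    induction k with
    | zero => omega
    | succ k ih =>
      intro _ hk
      by_cases hk1 : 1 ≤ k
      · have hsplit : PySem.List.pyRange 1 ((k : Int) + 1) 1 =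
            PySem.List.pyRange 1 (k : Int) 1 ++ [(k : Int)] := by
          exact PySem.List.pyRange_one_succ_right (by omega)
        have : ((k : Nat) + 1 : Nat) - 1 = (k - 1) + 1 := by omega
        rw [this]
        push_cast
        rw [hsplit, List.foldl_append]
        simp only [List.foldl_cons, List.foldl_nil]
        have hstep := good_step l p (k - 1) _ (ih hk1 (by omega)) (by omega)
        have hidx : ((k - 1 : Nat) : Int) + 1 = (k : Int) := by omega
        rwa [hidx] at hstep
      · have hk0 : k = 0 := by omega
        subst hk0
        have hnil : PySem.List.pyRange 1 1 1 = [] := PySem.List.pyRange_one_eq_nil (by omega)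
        push_cast
        rw [hnil]
        simpa using h0
  have hc : ((l.length : Int) - 1) = ((l.length - 1 : Nat) : Int) := by omega
  rw [hc]
  have := main (l.length - 1) (by omega) (le_refl _)
  have hm : l.length - 1 - 1 = l.length - 2 := by omega
  rwa [hm] at this

-- permutation identity for the two deletions
lemma perm_erase2 (l : List Int) (i j : Nat) (hij : j < i) (hi : i < l.length) :
    l.Perm (l.getD i 0 :: l.getD j 0 :: (l.eraseIdx i).eraseIdx j) := by
  have hj : j < l.length := lt_trans hij hi
  have hj' : j < (l.eraseIdx i).length := by
    simp [List.length_eraseIdx, hi]; omega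
  have e1 : l.Perm (l[i] :: l.eraseIdx i) := (List.getElem_cons_eraseIdx_perm hi).symm
  have e2 : (l.eraseIdx i).Perm ((l.eraseIdx i)[j] :: (l.eraseIdx i).eraseIdx j) :=
    (List.getElem_cons_eraseIdx_perm hj').symm
  have e3 : (l.eraseIdx i)[j]'hj' = l[j]'hj := List.getElem_eraseIdx_of_lt hj' hij
  rw [List.getD_eq_getElem l 0 hi, List.getD_eq_getElem l 0 hj]
  exact e1.trans (by rw [← e3]; exact e2.cons _)

-- decomposition of the sorted copy: min in front, max at the back, sorted middle
lemma sorted_decomp (l : List Int) (h2 : 2 ≤ l.length) (ma mi : Int)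
    (hma : ma ∈ l) (hma2 : ∀ x ∈ l, x ≤ ma) (hmi : mi ∈ l) (hmi2 : ∀ x ∈ l, mi ≤ x) :
    ∃ mid : List Int, PySem.List.sorted l (fun x => x) false = mi :: mid ++ [ma] ∧
      mid.Pairwise (· ≤ ·) ∧ (mi :: mid ++ [ma]).Perm l := by
  have hperm : (PySem.List.sorted l (fun x => x) false).Perm l := PySem.List.sorted_perm l _ _
  have hlen : (PySem.List.sorted l (fun x => x) false).length = l.length := hperm.length_eq
  obtain ⟨a, t, hat⟩ : ∃ a t, PySem.List.sorted l (fun x => x) false = a :: t := by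
    cases hs : PySem.List.sorted l (fun x => x) false with
    | nil => rw [hs] at hlen; simp at hlen; omega
    | cons a t => exact ⟨a, t, rfl⟩
  have ht : t ≠ [] := by
    intro h; rw [h] at hat; rw [hat] at hlen; simp at hlen; omega
  have hpw : (PySem.List.sorted l (fun x => x) false).Pairwise (fun x y => x ≤ y) :=
    PySem.List.sorted_pairwise l _
  -- head is the minimum
  have hhead : ∀ y ∈ l, a ≤ y := PySem.List.key_head_sorted_le l (fun x => x) hat
  have hain : a ∈ l := hperm.mem_iff.mp (by rw [hat]; simp)
  have hami : a = mi := le_antisymm (hhead mi hmi) (hmi2 a hain)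
  -- last is the maximum
  set b := t.getLast ht with hb
  have hdecomp : t = t.dropLast ++ [b] := (List.dropLast_concat_getLast ht).symm
  have hsd : PySem.List.sorted l (fun x => x) false = (a :: t.dropLast) ++ [b] := by
    rw [hat]; rw [hdecomp]; simp
  have hbin : b ∈ l := hperm.mem_iff.mp (by rw [hat]; exact List.mem_cons_of_mem _ (List.getLast_mem ht))
  have hpw2 : ((a :: t.dropLast) ++ [b]).Pairwise (fun x y => x ≤ y) := by rw [← hsd]; exact hpw
  have hmax_le : ∀ x ∈ (a :: t.dropLast), x ≤ b := by
    intro x hx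
    have := (List.pairwise_append.mp hpw2).2.2
    exact this x hx b (by simp)
  have hbma : b = ma := by
    have hma_in_s : ma ∈ (a :: t.dropLast) ++ [b] := by
      rw [← hsd]; exact hperm.mem_iff.mpr hma
    rcases List.mem_append.mp hma_in_s with h | h
    · exact le_antisymm (hma2 b hbin) (hmax_le ma h)
    · simp at h; omega
  refine ⟨t.dropLast, ?_, ?_, ?_⟩
  · rw [hsd, hami, hbma]
  · have hsub : t.dropLast.Sublist ((a :: t.dropLast) ++ [b]) := by
      refine List.Sublist.trans ?_ (List.sublist_append_left _ _)
      exact (List.sublist_cons_self _ _)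
    exact hpw2.sublist hsub
  · have : (mi :: t.dropLast ++ [ma]) = PySem.List.sorted l (fun x => x) false := by
      rw [hsd, hami, hbma]
    rw [this]; exact hperm

lemma go_eq (fuel : Nat) : ∀ (l : List Int) (p : Int), l.length ≤ fuel →
    sortminmax2Go fuel l p = altGo fuel (PySem.List.sorted l (fun x => x) false) p := by
  induction fuel with
  | zero => intro l p _; rfl
  | succ fuel ih =>
    intro l p hlen
    by_cases hgt : 1 < l.length
    · have h2 : 2 ≤ l.length := hgt
      obtain ⟨pM, pm, hst, hpM, hpm, hle, hb⟩ := good_fold l p h2 _ (good_init l p h2)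
      set n := l.length with hn
      set ma := l.getD pM 0 with hma_def
      set mi := l.getD pm 0 with hmi_def
      have hmax : ∀ x ∈ l, x ≤ ma := by
        intro x hx
        obtain ⟨j, hj, rfl⟩ := List.mem_iff_getElem.mp hx
        have := (hb j hj (by omega)).1
        rwa [List.getD_eq_getElem l 0 hj] at this
      have hmin : ∀ x ∈ l, mi ≤ x := by
        intro x hx
        obtain ⟨j, hj, rfl⟩ := List.mem_iff_getElem.mp hx
        have := (hb j hj (by omega)).2
        rwa [List.getD_eq_getElem l 0 hj] at this
      have hma_mem : ma ∈ l := by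
        rw [hma_def, List.getD_eq_getElem l 0 hpM]; exact List.getElem_mem hpM
      have hmi_mem : mi ∈ l := by
        rw [hmi_def, List.getD_eq_getElem l 0 hpm]; exact List.getElem_mem hpm
      obtain ⟨mid, hsdec, hmidpw, hsperm⟩ := sorted_decomp l h2 ma mi hma_mem hmax hmi_mem hmin
      have hslen : (mi :: mid ++ [ma]).length = n := hsperm.length_eq
      -- unfold one step of A
      rw [show sortminmax2Go (fuel + 1) l p =
        (if 1 < l.length then
          (let posFin : Int := (l.length : Int) - 1
           let pos0 : Int × Int :=
             if PySem.List.pyGetD l 0 0 > PySem.List.pyGetD l posFin 0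
             then (posFin, 0) else (0, posFin)
           let st := (PySem.List.pyRange 1 posFin 1).foldl (aStep l)
             (PySem.List.pyGetD l pos0.2 0, pos0.2, PySem.List.pyGetD l pos0.1 0, pos0.1, p)
           if st.1 ≠ st.2.2.1 then
             (if st.2.1 > st.2.2.2.1
               then sortminmax2Go fuel ((l.eraseIdx st.2.1.toNat).eraseIdx st.2.2.2.1.toNat) (st.2.2.2.2 + 1)
               else sortminmax2Go fuel ((l.eraseIdx st.2.2.2.1.toNat).eraseIdx st.2.1.toNat) (st.2.2.2.2 + 1))
           else st.2.2.2.2)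
        else p) from by simp only [sortminmax2Go]; split_ifs <;> rfl]
      rw [if_pos hgt]
      simp only
      rw [hst]
      simp only [ne_eq]
      -- unfold one step of B
      rw [hsdec]
      rw [show altGo (fuel + 1) (mi :: mid ++ [ma]) p =
        (if 1 < (mi :: mid ++ [ma]).length then
          (if PySem.List.pyGetD (mi :: mid ++ [ma]) 0 0 = PySem.List.pyGetD (mi :: mid ++ [ma]) (-1) 0 then
            p + ((mi :: mid ++ [ma]).length : Int) - 2
          else
            altGo fuel (PySem.List.slice (mi :: mid ++ [ma]) (some 1) (some (-1)))
              (p + ((mi :: mid ++ [ma]).length : Int) - 1))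
        else p) from by simp only [altGo]]
      have hget0 : PySem.List.pyGetD (mi :: mid ++ [ma]) 0 0 = mi := PySem.List.pyGetD_zero_cons _ _ _
      have hgetm1 : PySem.List.pyGetD (mi :: mid ++ [ma]) (-1) 0 = ma :=
        PySem.List.pyGetD_neg_one_append_singleton (xs := mi :: mid) (x := ma) (d := 0)
      rw [hget0, hgetm1]
      by_cases hcase : ma = mi
      · rw [if_neg (not_not_intro hcase)]
        rw [if_pos (by rw [hslen]; omega)]
        rw [if_pos hcase.symm]
        rw [hslen]
        omega
      · rw [if_pos hcase]
        have hne : pM ≠ pm := by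
          intro h; exact hcase (by rw [hma_def, hmi_def, h])
        have hslice : PySem.List.slice (mi :: mid ++ [ma]) (some 1) (some (-1)) = mid := by
          rw [slice_one_neg_one]
          simp
        have key : ∀ l' : List Int, l.Perm (ma :: mi :: l') →
            sortminmax2Go fuel l' (p + ((n - 2 : Nat) : Int) + 1) =
            altGo fuel mid (p + (n : Int) - 1) := by
          intro l' hL
          have hmidperm : mid.Perm l' := by
            have h1 : (ma :: mi :: mid).Perm (mi :: mid ++ [ma]) := by
              refine List.Perm.trans (List.Perm.swap mi ma mid) ?_
              exact List.Perm.cons mi (List.perm_append_singleton ma mid).symm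
            have h2 : (ma :: mi :: mid).Perm (ma :: mi :: l') :=
              (h1.trans hsperm).trans hL
            exact ((h2.cons_inv).cons_inv)
          have hsorted' : PySem.List.sorted l' (fun x => x) false = mid :=
            PySem.List.sorted_id_eq_of_perm_of_pairwise l' mid hmidperm hmidpw
          have hlen' : l'.length ≤ fuel := by
            have := hL.length_eq
            simp at this
            omega
          rw [ih l' _ hlen', hsorted']
          congr 1
          omega
        rcases Nat.lt_or_ge pm pM with hlt | hge
        · rw [if_pos (show ((pM : Int) > (pm : Int)) by exact_mod_cast hlt)]
          rw [if_pos (by rw [hslen]; omega)]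
          rw [if_neg (fun h => hcase h.symm)]
          rw [hslice, hslen]
          simp only [Int.toNat_natCast]
          exact key _ (perm_erase2 l pM pm hlt hpM)
        · have hlt' : pM < pm := by omega
          rw [if_neg (show ¬((pM : Int) > (pm : Int)) by omega)]
          rw [if_pos (by rw [hslen]; omega)]
          rw [if_neg (fun h => hcase h.symm)]
          rw [hslice, hslen]
          simp only [Int.toNat_natCast]
          refine key _ ?_
          refine List.Perm.trans (perm_erase2 l pm pM hlt' hpm) ?_
          exact List.Perm.swap ma mi _
    · have hslen : (PySem.List.sorted l (fun x => x) false).length = l.length :=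
        (PySem.List.sorted_perm l _ _).length_eq
      rw [show sortminmax2Go (fuel + 1) l p = p from by
        simp only [sortminmax2Go]; rw [if_neg hgt]]
      rw [show altGo (fuel + 1) (PySem.List.sorted l (fun x => x) false) p = p from by
        simp only [altGo]; rw [if_neg (by omega)]]

-- ===== VERDICT (by name: the statement is the Claim_ definition above) =====
theorem sortminmax2_spec : Claim_equal_sortminmax2 := by
  intro lista _
  show sortminmax2 lista = sortminmax2_alt lista
  unfold sortminmax2 sortminmax2_alt
  exact go_eq (lista.length + 1) lista 0 (by omega)
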